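-- pv_equiv track=rewrite | github.com/Whem/lotteryGuesser | src/LotteryGuesserDjango/processors/deterministic_markov_chain_prediction.py | _deterministic_fill
-- ===== SOURCE A (Python) =====
-- from typing import List, Tuple, Dict
--
-- def _deterministic_fill(min_num: int, max_num: int, needed: int, base: List[int]) -> List[int]:
--     # Deduplicate preserving order
--     seen = set()
--     filtered = []
--     for n in base:
--         if min_num <= n <= max_num and n not in seen:
--             seen.add(n)
--             filtered.append(n)
--     # Fill ascending
--     if len(filtered) < needed:
--         remain = [n for n in range(min_num, max_num + 1) if n not in seen]
--         filtered.extend(remain[: needed - len(filtered)])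
--     return sorted(filtered)[:needed]
-- ===== SOURCE B (Python) =====
-- from typing import List
--
-- def _deterministic_fill(min_num: int, max_num: int, needed: int, base: List[int]) -> List[int]:
--     # Sort base once, dedup by adjacency (no set), then one linear merge pass
--     # that interleaves the fill gaps with the members, building the final
--     # sorted output directly: no fill comprehension over the range and no
--     # final sort.
--     members = []
--     for v in sorted(base):
--         if min_num <= v <= max_num and (not members or v != members[-1]):
--             members.append(v)
--     k = needed - len(members)
--     result = []
--     g = min_num
--     for v in members:
--         while k > 0 and g < v:
--             result.append(g)
--             k -= 1
--             g += 1
--         result.append(v)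
--         g = v + 1
--     while k > 0 and g <= max_num:
--         result.append(g)
--         k -= 1
--         g += 1
--     return result[:needed]
-- ===== Notes on version B (the rewrite author's own statement) =====
-- stated objective: alternative
-- what changed: Instead of A's seen-set dedup loop, full-range fill comprehension and final sort, B sorts base once, dedups by adjacency in the sorted order, and builds the final sorted output in one linear merge pass that interleaves gap fills with the members, so there is no range comprehension and no final sort.
import Mathlib
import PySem

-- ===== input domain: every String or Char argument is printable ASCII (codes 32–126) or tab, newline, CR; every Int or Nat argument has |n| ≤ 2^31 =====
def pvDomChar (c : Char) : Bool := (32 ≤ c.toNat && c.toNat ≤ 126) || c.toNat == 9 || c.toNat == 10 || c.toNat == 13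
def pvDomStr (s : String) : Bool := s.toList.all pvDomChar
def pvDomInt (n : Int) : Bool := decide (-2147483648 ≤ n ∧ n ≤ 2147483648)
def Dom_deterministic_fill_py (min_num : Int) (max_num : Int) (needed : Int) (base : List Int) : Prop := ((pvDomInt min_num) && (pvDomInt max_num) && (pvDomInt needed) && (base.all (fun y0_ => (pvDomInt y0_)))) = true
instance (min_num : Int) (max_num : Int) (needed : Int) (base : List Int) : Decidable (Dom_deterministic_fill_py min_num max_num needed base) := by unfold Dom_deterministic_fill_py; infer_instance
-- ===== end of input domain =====

-- B (alternative, same cost): instead of A's seen-set dedup loop, full-range fill comprehension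
-- and final sort, B sorts base once, dedups by adjacency, and builds the sorted output in one
-- linear merge pass that interleaves gap fills with the members (no range scan, no final sort).

-- ===== PORT A =====
def deterministic_fill_py (min_num : Int) (max_num : Int) (needed : Int) (base : List Int) : List Int :=
  let st := base.foldl (fun (st : PySem.Set Int × List Int) n =>
      if min_num ≤ n ∧ n ≤ max_num ∧ ¬ PySem.Set.contains st.1 n
      then (PySem.Set.add st.1 n, st.2 ++ [n]) else st) (PySem.Set.empty, ([] : List Int))
  let seen := st.1
  let filtered := st.2
  let filtered :=
    if (filtered.length : Int) < needed then
      let remain := (PySem.List.pyRange min_num (max_num + 1) 1).filter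
        (fun n => ¬ PySem.Set.contains seen n)
      filtered ++ PySem.List.slice remain none (some (needed - (filtered.length : Int)))
    else filtered
  PySem.List.slice (PySem.List.sorted filtered (fun x => x) false) none (some needed)

-- ===== PORT B =====
-- B helper: the inner `while k > 0 and g < v: result.append(g); k -= 1; g += 1` loop
def dfGapRun (v : Int) (k : Int) (g : Int) (acc : List Int) : List Int × Int :=
  if k > 0 ∧ g < v then dfGapRun v (k - 1) (g + 1) (acc ++ [g]) else (acc, k)
termination_by (v - g).toNat
decreasing_by simp at *; omega

-- B helper: the trailing `while k > 0 and g <= max_num: result.append(g); k -= 1; g += 1` loop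
def dfTailRun (max_num : Int) (k : Int) (g : Int) (acc : List Int) : List Int :=
  if k > 0 ∧ g ≤ max_num then dfTailRun max_num (k - 1) (g + 1) (acc ++ [g]) else acc
termination_by (max_num + 1 - g).toNat
decreasing_by simp at *; omega

def deterministic_fill_py_alt (min_num : Int) (max_num : Int) (needed : Int) (base : List Int) : List Int :=
  let members := (PySem.List.sorted base (fun x => x) false).foldl (fun ms v =>
      if (min_num ≤ v ∧ v ≤ max_num) ∧ (ms = [] ∨ ¬ PySem.List.pyGet? ms (-1) = some v)
      then ms ++ [v] else ms) []
  let st := members.foldl (fun (st : List Int × Int × Int) v =>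
      let gr := dfGapRun v st.2.1 st.2.2 st.1
      (gr.1 ++ [v], gr.2, v + 1))
    (([] : List Int), needed - (members.length : Int), min_num)
  let result := dfTailRun max_num st.2.1 st.2.2 st.1
  PySem.List.slice result none (some needed)

-- ===== PRECONDITION & SPEC =====
def Spec_deterministic_fill_py (min_num : Int) (max_num : Int) (needed : Int) (base : List Int) (out : List Int) : Prop := out = deterministic_fill_py_alt min_num max_num needed base
instance (min_num : Int) (max_num : Int) (needed : Int) (base : List Int) (out : List Int) : Decidable (Spec_deterministic_fill_py min_num max_num needed base out) := by unfold Spec_deterministic_fill_py; infer_instance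

-- ===== CLAIM (what is proved, stated in full; the proofs are below) =====
def Claim_equal_deterministic_fill_py : Prop := ∀ (min_num : Int) (max_num : Int) (needed : Int) (base : List Int), Dom_deterministic_fill_py min_num max_num needed base → Spec_deterministic_fill_py min_num max_num needed base (deterministic_fill_py min_num max_num needed base)

-- ===== LEMMAS AND PROOFS =====

-- A's dedup loop from a consistent state (s, s) computes Set.update of the in-range filter.
theorem dfFoldA (min_num max_num : Int) (l : List Int) : ∀ (s : List Int),
    l.foldl (fun (st : PySem.Set Int × List Int) n =>
      if min_num ≤ n ∧ n ≤ max_num ∧ ¬ PySem.Set.contains st.1 n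
      then (PySem.Set.add st.1 n, st.2 ++ [n]) else st) (s, s)
    = (PySem.Set.update s (l.filter (fun n => decide (min_num ≤ n ∧ n ≤ max_num))),
       PySem.Set.update s (l.filter (fun n => decide (min_num ≤ n ∧ n ≤ max_num)))) := by
  induction l with
  | nil => intro s; simp [PySem.Set.update]
  | cons x xs ih =>
    intro s
    by_cases hp : min_num ≤ x ∧ x ≤ max_num
    · by_cases hm : x ∈ s
      · simp only [List.foldl_cons, List.filter_cons]
        rw [if_neg (by simp [hp, hm]), if_pos (by simpa using hp)]
        rw [ih s, PySem.Set.update_cons, PySem.Set.add_of_mem hm]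
      · simp only [List.foldl_cons, List.filter_cons]
        rw [if_pos (by simp [hp, hm]), if_pos (by simpa using hp)]
        rw [PySem.Set.add_of_not_mem hm, ih (s ++ [x]), PySem.Set.update_cons,
            PySem.Set.add_of_not_mem hm]
    · simp only [List.foldl_cons, List.filter_cons]
      rw [if_neg (fun hcon => hp ⟨hcon.1, hcon.2.1⟩), if_neg (by simpa using hp), ih s]

-- xs[-1] is the last element.
theorem dfPyGetLast (ms : List Int) : PySem.List.pyGet? ms (-1) = ms.getLast? := by
  cases ms with
  | nil => rfl
  | cons a t => simp [PySem.List.pyGet?, PySem.List.pyIdx?, List.getLast?_eq_getElem?]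

-- In a strictly increasing list every element is at most the last one.
theorem dfLeGetLast (ms : List Int) (h : ms.Pairwise (· < ·)) (hne : ms ≠ []) :
    ∀ x ∈ ms, x ≤ ms.getLast hne := by
  induction ms with
  | nil => exact absurd rfl hne
  | cons a t ih =>
    intro x hx
    cases t with
    | nil => simp at hx; simp [hx]
    | cons b t' =>
      rw [List.getLast_cons (by simp)]
      rcases List.mem_cons.mp hx with rfl | hxt
      · have hlast : (b :: t').getLast (by simp) ∈ b :: t' := List.getLast_mem _
        exact le_of_lt ((List.pairwise_cons.mp h).1 _ hlast)
      · exact ih (List.pairwise_cons.mp h).2 (by simp) x hxt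

-- B's member pass: from a valid accumulator it yields a strictly increasing list whose
-- members are the in-range values of the input plus the accumulator.
theorem dfFoldMembers (min_num max_num : Int) (l : List Int) :
    ∀ (ms : List Int), l.Pairwise (· ≤ ·) → ms.Pairwise (· < ·) →
    (∀ x ∈ ms, ∀ y ∈ l, x ≤ y) →
    (l.foldl (fun ms v =>
      if (min_num ≤ v ∧ v ≤ max_num) ∧ (ms = [] ∨ ¬ PySem.List.pyGet? ms (-1) = some v)
      then ms ++ [v] else ms) ms).Pairwise (· < ·) ∧
    (∀ x, x ∈ (l.foldl (fun ms v =>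
      if (min_num ≤ v ∧ v ≤ max_num) ∧ (ms = [] ∨ ¬ PySem.List.pyGet? ms (-1) = some v)
      then ms ++ [v] else ms) ms) ↔ x ∈ ms ∨ (x ∈ l ∧ min_num ≤ x ∧ x ≤ max_num)) := by
  induction l with
  | nil => intro ms _ hms _; simpa using hms
  | cons v l ih =>
    intro ms hl hms hbound
    have hl' : l.Pairwise (· ≤ ·) := (List.pairwise_cons.mp hl).2
    have hvl : ∀ y ∈ l, v ≤ y := (List.pairwise_cons.mp hl).1
    by_cases hcond : (min_num ≤ v ∧ v ≤ max_num) ∧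
        (ms = [] ∨ ¬ PySem.List.pyGet? ms (-1) = some v)
    · -- v accepted: new accumulator ms ++ [v]
      have hlt : ∀ x ∈ ms, x < v := by
        intro x hx
        have hne : ms ≠ [] := by rintro rfl; simp at hx
        have hlast := List.getLast_mem hne
        have h1 : ms.getLast hne ≤ v := hbound _ hlast v (by simp)
        have h2 : ms.getLast hne ≠ v := by
          rcases hcond.2 with h | h
          · exact absurd h hne
          · intro hcon
            exact h (by rw [dfPyGetLast, List.getLast?_eq_some_getLast hne, hcon])
        have hxle := dfLeGetLast ms hms hne x hx
        omega
      have hms' : (ms ++ [v]).Pairwise (· < ·) :=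
        List.pairwise_append.mpr ⟨hms, by simp, by simpa using hlt⟩
      have hbound' : ∀ x ∈ ms ++ [v], ∀ y ∈ l, x ≤ y := by
        intro x hx y hy
        rcases List.mem_append.mp hx with hx | hx
        · exact le_trans (hbound x hx v (by simp)) (hvl y hy)
        · simp at hx; subst hx; exact hvl y hy
      have := ih (ms ++ [v]) hl' hms' hbound'
      rw [List.foldl_cons, if_pos hcond]
      refine ⟨this.1, fun x => (this.2 x).trans ?_⟩
      constructor
      · rintro (hx | hx)
        · rcases List.mem_append.mp hx with hx | hx
          · exact Or.inl hx
          · simp at hx; subst hx; exact Or.inr ⟨by simp, hcond.1⟩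
        · exact Or.inr ⟨by simp [hx.1], hx.2⟩
      · rintro (hx | ⟨hx, hr⟩)
        · exact Or.inl (by simp [hx])
        · rcases List.mem_cons.mp hx with rfl | hx
          · exact Or.inl (by simp)
          · exact Or.inr ⟨hx, hr⟩
    · -- v rejected: either out of range, or v is already the last member
      have := ih ms hl' hms (fun x hx y hy => le_trans (hbound x hx v (by simp)) (hvl y hy))
      rw [List.foldl_cons, if_neg hcond]
      refine ⟨this.1, fun x => (this.2 x).trans ?_⟩
      constructor
      · rintro (hx | hx)
        · exact Or.inl hx
        · exact Or.inr ⟨by simp [hx.1], hx.2⟩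
      · rintro (hx | ⟨hx, hr⟩)
        · exact Or.inl hx
        · rcases List.mem_cons.mp hx with hxv | hx
          · -- v rejected while in range: v is the last member, so v ∈ ms
            rcases not_and_or.mp hcond with hcon | hcon
            · exact absurd (hxv ▸ hr) hcon
            · have h2 := not_or.mp hcon
              have hlast : PySem.List.pyGet? ms (-1) = some v := by
                by_contra hc
                exact h2.2 hc
              exact Or.inl (hxv ▸ List.mem_of_getLast? (by rw [← dfPyGetLast]; exact hlast))
          · exact Or.inr ⟨hx, hr⟩

-- Pure form of B's merge pass (proof helper, not part of the port).
def dfMerge (mx : Int) (g : Int) (k : Int) : List Int → List Int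
  | [] => (PySem.List.pyRange g (mx + 1) 1).take k.toNat
  | v :: ms =>
    let T := (PySem.List.pyRange g v 1).take k.toNat
    T ++ v :: dfMerge mx (v + 1) (k - (T.length : Int)) ms

-- the inner while loop emits the first k numbers of [g, v)
theorem dfGapRun_spec (v : Int) : ∀ (fuel : Nat) (k g : Int) (acc : List Int),
    (v - g).toNat ≤ fuel →
    dfGapRun v k g acc = (acc ++ (PySem.List.pyRange g v 1).take k.toNat,
      k - (((PySem.List.pyRange g v 1).take k.toNat).length : Int)) := by
  intro fuel
  induction fuel with
  | zero =>
    intro k g acc hf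
    rw [dfGapRun, if_neg (by omega), PySem.List.pyRange_one_eq_nil (by omega)]
    simp
  | succ m ih =>
    intro k g acc hf
    by_cases hrun : k > 0 ∧ g < v
    · have hkn : k.toNat = (k - 1).toNat + 1 := by omega
      rw [dfGapRun, if_pos hrun, PySem.List.pyRange_one_cons (a := g) (b := v) (by omega),
          hkn, List.take_succ_cons, ih (k - 1) (g + 1) (acc ++ [g]) (by omega)]
      refine Prod.ext (by simp) ?_
      simp
      omega
    · rcases not_and_or.mp hrun with hk | hg
      · have hz : k.toNat = 0 := by omega
        rw [dfGapRun, if_neg hrun, hz]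
        simp
      · rw [dfGapRun, if_neg hrun, PySem.List.pyRange_one_eq_nil (by omega)]
        simp

-- the trailing while loop emits the first k numbers of [g, max_num]
theorem dfTailRun_spec (mx : Int) : ∀ (fuel : Nat) (k g : Int) (acc : List Int),
    (mx + 1 - g).toNat ≤ fuel →
    dfTailRun mx k g acc = acc ++ (PySem.List.pyRange g (mx + 1) 1).take k.toNat := by
  intro fuel
  induction fuel with
  | zero =>
    intro k g acc hf
    rw [dfTailRun, if_neg (by omega), PySem.List.pyRange_one_eq_nil (by omega)]
    simp
  | succ m ih =>
    intro k g acc hf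
    by_cases hrun : k > 0 ∧ g ≤ mx
    · have hkn : k.toNat = (k - 1).toNat + 1 := by omega
      rw [dfTailRun, if_pos hrun, PySem.List.pyRange_one_cons (a := g) (b := mx + 1) (by omega),
          hkn, List.take_succ_cons, ih (k - 1) (g + 1) (acc ++ [g]) (by omega)]
      simp
    · rcases not_and_or.mp hrun with hk | hg
      · have hz : k.toNat = 0 := by omega
        rw [dfTailRun, if_neg hrun, hz]
        simp
      · rw [dfTailRun, if_neg hrun, PySem.List.pyRange_one_eq_nil (by omega)]
        simp

-- B's merge fold followed by the trailing loop computes dfMerge.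
theorem dfFoldMerge (mx : Int) (ms : List Int) : ∀ (acc : List Int) (k g : Int),
    dfTailRun mx
      (ms.foldl (fun (st : List Int × Int × Int) v =>
        let gr := dfGapRun v st.2.1 st.2.2 st.1
        (gr.1 ++ [v], gr.2, v + 1)) (acc, k, g)).2.1
      (ms.foldl (fun (st : List Int × Int × Int) v =>
        let gr := dfGapRun v st.2.1 st.2.2 st.1
        (gr.1 ++ [v], gr.2, v + 1)) (acc, k, g)).2.2
      (ms.foldl (fun (st : List Int × Int × Int) v =>
        let gr := dfGapRun v st.2.1 st.2.2 st.1
        (gr.1 ++ [v], gr.2, v + 1)) (acc, k, g)).1 = acc ++ dfMerge mx g k ms := by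
  induction ms with
  | nil =>
    intro acc k g
    exact dfTailRun_spec mx (mx + 1 - g).toNat k g acc (le_refl _)
  | cons v ms ih =>
    intro acc k g
    simp only [List.foldl_cons, dfGapRun_spec v (v - g).toNat k g acc (le_refl _)]
    rw [ih]
    simp [dfMerge, List.append_assoc]

-- dfMerge stays inside the ascending range, hence is strictly increasing.
theorem dfMerge_sublist (mx : Int) (ms : List Int) : ∀ (g k : Int),
    ms.Pairwise (· < ·) → (∀ x ∈ ms, g ≤ x ∧ x ≤ mx) →
    (dfMerge mx g k ms).Sublist (PySem.List.pyRange g (mx + 1) 1) := by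
  induction ms with
  | nil => intro g k _ _; exact List.take_sublist _ _
  | cons v ms ih =>
    intro g k hpw hb
    have hv := hb v (by simp)
    rw [PySem.List.pyRange_one_append g v (mx + 1) hv.1 (by omega),
        PySem.List.pyRange_one_cons (show v < mx + 1 by omega)]
    refine List.Sublist.append (List.take_sublist _ _) (List.Sublist.cons₂ v ?_)
    refine ih (v + 1) _ (List.pairwise_cons.mp hpw).2 (fun x hx => ?_)
    have := (List.pairwise_cons.mp hpw).1 x hx
    have := hb x (by simp [hx])
    omega

-- dfMerge is a permutation of the members plus the first k missing range values.
theorem dfMerge_perm (mx : Int) (ms : List Int) : ∀ (g k : Int),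
    ms.Pairwise (· < ·) → (∀ x ∈ ms, g ≤ x ∧ x ≤ mx) →
    (dfMerge mx g k ms).Perm
      (ms ++ ((PySem.List.pyRange g (mx + 1) 1).filter
        (fun x => !decide (x ∈ ms))).take k.toNat) := by
  induction ms with
  | nil =>
    intro g k _ _
    simp [dfMerge]
  | cons v ms ih =>
    intro g k hpw hb
    have hv := hb v (by simp)
    have hgt : ∀ x ∈ ms, v < x := (List.pairwise_cons.mp hpw).1
    -- split the range at v
    rw [PySem.List.pyRange_one_append g v (mx + 1) hv.1 (by omega),
        PySem.List.pyRange_one_cons (show v < mx + 1 by omega), List.filter_append,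
        List.filter_cons]
    have hlow : (PySem.List.pyRange g v 1).filter (fun x => !decide (x ∈ v :: ms))
        = PySem.List.pyRange g v 1 := by
      refine List.filter_eq_self.mpr (fun x hx => ?_)
      have hxv : x < v := (PySem.List.mem_pyRange_one.mp hx).2
      have hnm : ¬ (x ∈ v :: ms) := by
        intro hmem
        rcases List.mem_cons.mp hmem with h1 | h2
        · omega
        · have := hgt x h2; omega
      simp [hnm]
    have hhigh : (PySem.List.pyRange (v + 1) (mx + 1) 1).filter (fun x => !decide (x ∈ v :: ms))
        = (PySem.List.pyRange (v + 1) (mx + 1) 1).filter (fun x => !decide (x ∈ ms)) := by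
      refine List.filter_congr (fun x hx => ?_)
      have hxv : v < x := (PySem.List.mem_pyRange_one.mp hx).1
      have hiff : (x ∈ v :: ms) ↔ (x ∈ ms) := by
        rw [List.mem_cons]
        constructor
        · intro h
          rcases h with h1 | h2
          · omega
          · exact h2
        · exact Or.inr
      simp [hiff]
    rw [hlow, hhigh, if_neg (by simp), List.take_append]
    set T := (PySem.List.pyRange g v 1).take k.toNat with hT
    have hklen : (k - (T.length : Int)).toNat = k.toNat - (PySem.List.pyRange g v 1).length := by
      have hlt := List.length_take (i := k.toNat) (l := PySem.List.pyRange g v 1)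
      rw [hT, hlt]
      omega
    have hrec := ih (v + 1) (k - (T.length : Int))
      (List.pairwise_cons.mp hpw).2
      (fun x hx => by have h1 := hgt x hx; have h2 := hb x (by simp [hx]); omega)
    rw [hklen] at hrec
    set Q := ((PySem.List.pyRange (v + 1) (mx + 1) 1).filter
      (fun x => !decide (x ∈ ms))).take (k.toNat - (PySem.List.pyRange g v 1).length) with hQ
    show (T ++ v :: dfMerge mx (v + 1) (k - (T.length : Int)) ms).Perm ((v :: ms) ++ (T ++ Q))
    refine (List.Perm.append_left T (List.Perm.cons v hrec)).trans ?_
    refine (List.perm_middle).trans ?_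
    refine List.Perm.cons v ?_
    have hcomm : ((T ++ ms) ++ Q).Perm ((ms ++ T) ++ Q) :=
      List.perm_append_comm.append_right Q
    simpa [List.append_assoc] using hcomm

-- ===== VERDICT (by name: the statement is the Claim_ definition above) =====
theorem deterministic_fill_py_spec : Claim_equal_deterministic_fill_py := by
  intro min_num max_num needed base _hdom
  unfold Spec_deterministic_fill_py
  dsimp only [deterministic_fill_py, deterministic_fill_py_alt]
  rw [show (PySem.Set.empty : PySem.Set Int) = ([] : List Int) from rfl,
      dfFoldA min_num max_num base []]
  rw [show ∀ xs : List Int, PySem.Set.update [] xs = PySem.Set.ofList xs from fun _ => rfl]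
  set F := base.filter (fun n => decide (min_num ≤ n ∧ n ≤ max_num)) with hF
  set s := PySem.Set.ofList F with hsdef
  have hsnd : s.Nodup := PySem.Set.nodup_ofList F
  have hbs : ∀ x ∈ s, min_num ≤ x ∧ x ≤ max_num := by
    intro x hx
    have hxF : x ∈ F := by simpa [hsdef] using (PySem.Set.mem_ofList F x).mp hx
    have := List.of_mem_filter hxF
    simpa using this
  -- B's member pass computes a strictly increasing enumeration M of s
  set M := (PySem.List.sorted base (fun x => x) false).foldl (fun ms v =>
      if (min_num ≤ v ∧ v ≤ max_num) ∧ (ms = [] ∨ ¬ PySem.List.pyGet? ms (-1) = some v)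
      then ms ++ [v] else ms) [] with hMdef
  have hMfold := dfFoldMembers min_num max_num (PySem.List.sorted base (fun x => x) false) []
    (by simpa using PySem.List.sorted_pairwise base (fun x => x)) (by simp) (by simp)
  have hMpw : M.Pairwise (· < ·) := hMfold.1
  have hMnd : M.Nodup := hMpw.imp ne_of_lt
  have hMmem : ∀ x, x ∈ M ↔ x ∈ s := by
    intro x
    rw [hMdef]
    rw [hMfold.2 x]
    simp only [List.not_mem_nil, false_or, PySem.List.mem_sorted]
    rw [hsdef, PySem.Set.mem_ofList, hF, List.mem_filter]
    simp
  have hMperm : M.Perm s :=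
    (List.perm_ext_iff_of_nodup hMnd hsnd).mpr (fun a => hMmem a)
  have hMb : ∀ x ∈ M, min_num ≤ x ∧ x ≤ max_num := fun x hx => hbs x ((hMmem x).mp hx)
  have hMlen : (M.length : Int) = ((s : List Int).length : Int) := by
    exact_mod_cast congrArg Nat.cast hMperm.length_eq
  -- B's merge pass computes dfMerge
  rw [dfFoldMerge max_num M [] (needed - (M.length : Int)) min_num, List.nil_append]
  rw [hMlen]
  set kk : Int := needed - ((s : List Int).length : Int) with hkk
  set R := dfMerge max_num min_num kk M with hR
  have hRpair : R.Pairwise (· < ·) :=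
    (PySem.List.pairwise_lt_pyRange_one min_num (max_num + 1)).sublist
      (dfMerge_sublist max_num M min_num kk hMpw hMb)
  have hfeq : (PySem.List.pyRange min_num (max_num + 1) 1).filter (fun x => !decide (x ∈ M))
      = (PySem.List.pyRange min_num (max_num + 1) 1).filter
        (fun n => decide ¬(PySem.Set.contains s n = true)) := by
    refine List.filter_congr (fun x _ => ?_)
    simp [PySem.Set.contains, hMmem x]
  have hRperm : R.Perm (s ++ ((PySem.List.pyRange min_num (max_num + 1) 1).filter
      (fun n => decide ¬(PySem.Set.contains s n = true))).take kk.toNat) := by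
    refine (dfMerge_perm max_num M min_num kk hMpw hMb).trans ?_
    rw [hfeq]
    exact hMperm.append_right _
  dsimp only
  by_cases h : ((s : List Int).length : Int) < needed
  · rw [if_pos h,
      PySem.List.slice_to ((PySem.List.pyRange min_num (max_num + 1) 1).filter
        (fun n => decide ¬(PySem.Set.contains s n = true))) (b := kk) (by omega)]
    exact congrArg (fun l => PySem.List.slice l none (some needed))
      (PySem.List.sorted_eq_of_perm_of_pairwise_lt _ _ _ hRperm hRpair)
  · rw [if_neg h]
    have hk0 : kk.toNat = 0 := by omega
    rw [hk0, List.take_zero, List.append_nil] at hRperm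
    exact congrArg (fun l => PySem.List.slice l none (some needed))
      (PySem.List.sorted_eq_of_perm_of_pairwise_lt _ _ _ hRperm hRpair)
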